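-- pv_equiv track=rewrite | github.com/tinnlo/lukas_9688 | scripts/targeted_analysis/models.py | sanitize_gemini_output
-- ===== SOURCE A (Python) =====
-- from typing import Optional, List, Dict, Any
--
-- def sanitize_gemini_output(text: str, required_first_line: Optional[str] = None) -> str:
--     """
--     Clean Gemini CLI output by removing meta-lines and collapsing excessive empty lines.
--
--     Args:
--         text: Raw Gemini output
--         required_first_line: Optional expected first line (e.g., "## Shot List")
--
--     Returns:
--         Cleaned markdown with max 1 consecutive empty line
--     """
--     META_LINE_PREFIXES = (
--         "Loaded cached credentials.",
--         "Server ",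
--         "Here is",
--         "***Note:",
--         "I will",
--         "I'll",
--     )
--
--     lines = text.split('\n')
--     cleaned_lines = []
--     empty_line_count = 0
--
--     for line in lines:
--         # Skip meta-lines
--         if any(line.strip().startswith(prefix) for prefix in META_LINE_PREFIXES):
--             continue
--
--         # Track empty lines to collapse them (max 1 consecutive empty line)
--         if not line.strip():
--             empty_line_count += 1
--             if empty_line_count == 1:
--                 cleaned_lines.append(line)
--         else:
--             empty_line_count = 0
--             cleaned_lines.append(line)
--
--     # Ensure first line matches expected header if specified
--     if required_first_line and cleaned_lines and not cleaned_lines[0].strip().startswith(required_first_line):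
--         cleaned_lines.insert(0, required_first_line)
--
--     # Trim leading/trailing empty lines
--     while cleaned_lines and not cleaned_lines[0].strip():
--         cleaned_lines.pop(0)
--     while cleaned_lines and not cleaned_lines[-1].strip():
--         cleaned_lines.pop()
--
--     return '\n'.join(cleaned_lines)
-- ===== SOURCE B (Python) =====
-- from typing import Optional
--
-- _META_LINE_PREFIXES = (
--     "Loaded cached credentials.",
--     "Server ",
--     "Here is",
--     "***Note:",
--     "I will",
--     "I'll",
-- )
--
--
-- def _drop_leading_blanks(lines):
--     """Return lines from the first non-blank line onward ([] if all blank)."""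
--     for i, line in enumerate(lines):
--         if line.strip():
--             return lines[i:]
--     return []
--
--
-- def sanitize_gemini_output(text: str, required_first_line: Optional[str] = None) -> str:
--     # Pass 1: drop meta-lines.
--     kept = [l for l in text.split('\n')
--             if not any(l.strip().startswith(p) for p in _META_LINE_PREFIXES)]
--
--     # Pass 2: collapse blank runs, keeping only the first line of each run.
--     cleaned = [l for prev, l in zip([None] + kept, kept)
--                if l.strip() or prev is None or prev.strip()]
--
--     # Ensure expected header.
--     if required_first_line and cleaned and not cleaned[0].strip().startswith(required_first_line):
--         cleaned = [required_first_line] + cleaned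
--
--     # Trim blank lines at both ends.
--     cleaned = _drop_leading_blanks(cleaned)
--     cleaned = _drop_leading_blanks(cleaned[::-1])[::-1]
--
--     return '\n'.join(cleaned)
-- ===== Notes on version B (the rewrite author's own statement) =====
-- stated objective: alternative
-- what changed: Replaces A's single counter-carrying loop (with meta-skip, empty_line_count state and in-place pop() trimming) by a pipeline: filter out meta-lines, collapse blank runs by pairing each line with its predecessor via zip, and trim the edges by locating the first non-blank index and slicing (applied forwards and on the reversed list).
import Mathlib
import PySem

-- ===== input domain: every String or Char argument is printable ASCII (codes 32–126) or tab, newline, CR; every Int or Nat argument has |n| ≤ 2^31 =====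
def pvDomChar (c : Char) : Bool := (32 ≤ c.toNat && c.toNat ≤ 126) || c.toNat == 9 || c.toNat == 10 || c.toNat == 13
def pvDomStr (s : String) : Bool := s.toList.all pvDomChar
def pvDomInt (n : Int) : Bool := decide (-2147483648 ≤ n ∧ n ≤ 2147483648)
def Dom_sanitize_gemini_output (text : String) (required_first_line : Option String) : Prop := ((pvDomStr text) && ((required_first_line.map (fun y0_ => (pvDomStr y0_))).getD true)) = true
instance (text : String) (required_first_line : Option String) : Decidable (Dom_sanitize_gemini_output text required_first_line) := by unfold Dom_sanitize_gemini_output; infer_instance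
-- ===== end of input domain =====

-- B is an 'alternative' decomposition of the same cleanup: filter meta-lines, collapse blank
-- runs by pairing each line with its predecessor, and trim the edges by index-slicing —
-- instead of A's single counter-carrying loop with in-place pops. Same cost, no speed claim.

-- shared predicates (the very same expressions appear in both Pythons)
def pvMetaPrefixes : List String :=
  ["Loaded cached credentials.", "Server ", "Here is", "***Note:", "I will", "I'll"]

def pvBlank (l : String) : Bool := PySem.Str.strip l == ""

def pvMeta (l : String) : Bool :=
  pvMetaPrefixes.any (fun p => PySem.Str.startswith (PySem.Str.strip l) p)

-- ===== PORT A =====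
-- loop body of A's single for-loop; state = (cleaned_lines, empty_line_count)
def pvLoopA (st : List String × Nat) (line : String) : List String × Nat :=
  if pvMeta line then st
  else if pvBlank line then
    let c := st.2 + 1
    (if c == 1 then st.1 ++ [line] else st.1, c)
  else (st.1 ++ [line], 0)

-- while cleaned_lines and not cleaned_lines[0].strip(): cleaned_lines.pop(0)
def pvTrimStartA : List String → List String
  | [] => []
  | x :: xs => if pvBlank x then pvTrimStartA xs else x :: xs

-- while cleaned_lines and not cleaned_lines[-1].strip(): cleaned_lines.pop()
def pvTrimEndA (l : List String) : List String :=
  match h : l.getLast? with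
  | none => l
  | some x => if pvBlank x then pvTrimEndA l.dropLast else l
termination_by l.length
decreasing_by
  have hne : l ≠ [] := by rintro rfl; simp at h
  simp [List.length_dropLast]
  exact List.length_pos_of_ne_nil hne

def sanitize_gemini_output (text : String) (required_first_line : Option String) : String :=
  let lines := (PySem.Str.split? text "\n").getD []
  let cleaned := (lines.foldl pvLoopA ([], 0)).1
  let cleaned2 :=
    match required_first_line with
    | none => cleaned
    | some r =>
        if (r != "") && (!cleaned.isEmpty)
            && !(PySem.Str.startswith (PySem.Str.strip (cleaned.headD "")) r)
        then r :: cleaned else cleaned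
  PySem.Str.join "\n" (pvTrimEndA (pvTrimStartA cleaned2))

-- ===== PORT B =====
-- _drop_leading_blanks: index of the first non-blank line, slice from there ([] if none)
def pvDropLeadingBlanks (l : List String) : List String :=
  match l.findIdx? (fun x => !pvBlank x) with
  | some i => l.drop i
  | none => []

-- keep a line if it is non-blank, or its predecessor (None before the first) is non-blank
def pvKeepPair (pl : Option String × String) : Bool :=
  !pvBlank pl.2 || (match pl.1 with | none => true | some p => !pvBlank p)

def sanitize_gemini_output_alt (text : String) (required_first_line : Option String) : String :=
  let lines := (PySem.Str.split? text "\n").getD []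
  let kept := lines.filter (fun l => !pvMeta l)
  let cleaned := (((none :: kept.map some).zip kept).filter pvKeepPair).map Prod.snd
  let cleaned2 :=
    match required_first_line with
    | none => cleaned
    | some r =>
        if (r != "") && (!cleaned.isEmpty)
            && !(PySem.Str.startswith (PySem.Str.strip (cleaned.headD "")) r)
        then r :: cleaned else cleaned
  let c1 := pvDropLeadingBlanks cleaned2
  let c2 := (pvDropLeadingBlanks c1.reverse).reverse
  PySem.Str.join "\n" c2

-- ===== PRECONDITION & SPEC =====
def Spec_sanitize_gemini_output (text : String) (required_first_line : Option String) (out : String) : Prop := out = sanitize_gemini_output_alt text required_first_line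
instance (text : String) (required_first_line : Option String) (out : String) : Decidable (Spec_sanitize_gemini_output text required_first_line out) := by unfold Spec_sanitize_gemini_output; infer_instance

-- ===== CLAIM (what is proved, stated in full; the proofs are below) =====
def Claim_equal_sanitize_gemini_output : Prop := ∀ (text : String) (required_first_line : Option String), Dom_sanitize_gemini_output text required_first_line → Spec_sanitize_gemini_output text required_first_line (sanitize_gemini_output text required_first_line)

-- ===== LEMMAS AND PROOFS =====

-- canonical "collapse blank runs" function; b = "previous kept line was blank"
def pvKeepRun : Bool → List String → List String
  | _, [] => []
  | b, x :: xs =>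
      if pvBlank x then (if b then pvKeepRun true xs else x :: pvKeepRun true xs)
      else x :: pvKeepRun false xs

-- A's fold only ever extends the list, skipping meta lines ⇒ fold over the filtered list
theorem pvFoldA_filter (l : List String) (st : List String × Nat) :
    l.foldl pvLoopA st = (l.filter (fun x => !pvMeta x)).foldl pvLoopA st := by
  induction l generalizing st with
  | nil => rfl
  | cons x xs ih =>
      by_cases hm : pvMeta x
      · simp [List.filter, hm, pvLoopA, ih]
      · simp [List.filter, hm, List.foldl, ih]

-- on meta-free input, A's counter loop produces exactly pvKeepRun
theorem pvFoldA_keepRun (l : List String) (acc : List String) (c : Nat)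
    (h : ∀ x ∈ l, pvMeta x = false) :
    (l.foldl pvLoopA (acc, c)).1 = acc ++ pvKeepRun (c != 0) l := by
  induction l generalizing acc c with
  | nil => simp [pvKeepRun]
  | cons x xs ih =>
      have hx : pvMeta x = false := h x (by simp)
      have hxs : ∀ y ∈ xs, pvMeta y = false := fun y hy => h y (by simp [hy])
      by_cases hb : pvBlank x
      · cases c with
        | zero =>
            simp only [List.foldl, pvLoopA, hx, hb, Bool.false_eq_true, if_false, if_true]
            simp [ih _ _ hxs, pvKeepRun, hb]
        | succ n =>
            simp only [List.foldl, pvLoopA, hx, hb, Bool.false_eq_true, if_false, if_true]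
            have : (n + 1 + 1 == 1) = false := by simp
            simp [this, ih _ _ hxs, pvKeepRun, hb]
      · simp only [List.foldl, pvLoopA, hx, hb, Bool.false_eq_true, if_false]
        simp [ih _ _ hxs, pvKeepRun, hb]

-- B's predecessor-pairing produces exactly pvKeepRun
theorem pvZip_keepRun (l : List String) (p : Option String) :
    (((p :: l.map some).zip l).filter pvKeepPair).map Prod.snd
      = pvKeepRun (match p with | none => false | some y => pvBlank y) l := by
  induction l generalizing p with
  | nil => cases p <;> rfl
  | cons x xs ih =>
      have step : ((p :: (x :: xs).map some).zip (x :: xs))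
          = (p, x) :: ((some x :: xs.map some).zip xs) := by simp
      rw [step]
      by_cases hb : pvBlank x
      · cases p with
        | none => simp [List.filter, pvKeepPair, hb, ih, pvKeepRun]
        | some y =>
            by_cases hp : pvBlank y
            · simp [List.filter, pvKeepPair, hb, hp, ih, pvKeepRun]
            · simp [List.filter, pvKeepPair, hb, hp, ih, pvKeepRun]
      · cases p with
        | none => simp [List.filter, pvKeepPair, hb, ih, pvKeepRun]
        | some y => simp [List.filter, pvKeepPair, hb, ih, pvKeepRun]

-- B's findIdx?-and-slice is A's pop-front while-loop
theorem pvDrop_eq_trimStart (l : List String) :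
    pvDropLeadingBlanks l = pvTrimStartA l := by
  induction l with
  | nil => rfl
  | cons x xs ih =>
      unfold pvDropLeadingBlanks at ih ⊢
      rw [List.findIdx?_cons]
      by_cases hb : pvBlank x
      · rw [if_neg (by simp [hb])]
        cases hfi : xs.findIdx? (fun x => !pvBlank x) with
        | none =>
            rw [hfi] at ih
            simp only [Option.map_none]
            simpa [pvTrimStartA, hb] using ih
        | some i =>
            rw [hfi] at ih
            simp only [Option.map_some]
            simpa [pvTrimStartA, hb, List.drop_succ_cons] using ih
      · rw [if_pos (by simp [hb])]
        simp [pvTrimStartA, hb]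

theorem pvTrimEndA_nil : pvTrimEndA [] = [] := by
  rw [pvTrimEndA]
  split
  · rfl
  · next h => simp at h

theorem pvTrimEndA_concat (l : List String) (x : String) :
    pvTrimEndA (l ++ [x]) = if pvBlank x then pvTrimEndA l else l ++ [x] := by
  rw [pvTrimEndA]
  split
  · next h => simp at h
  · next y h =>
      rw [List.getLast?_concat] at h
      cases h
      rw [List.dropLast_concat]

-- A's pop-back while-loop is front-trimming of the reversed list
theorem pvTrimEnd_eq_rev (l : List String) :
    pvTrimEndA l = (pvTrimStartA l.reverse).reverse := by
  induction l using List.reverseRecOn with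
  | nil => simp [pvTrimEndA_nil, pvTrimStartA]
  | append_singleton l x ih =>
      rw [pvTrimEndA_concat]
      simp only [List.reverse_append, List.reverse_cons, List.reverse_nil,
        List.nil_append, List.cons_append]
      by_cases hb : pvBlank x
      · simp [hb, ih, pvTrimStartA]
      · simp [hb, pvTrimStartA]

-- ===== VERDICT (by name: the statement is the Claim_ definition above) =====
theorem sanitize_gemini_output_spec : Claim_equal_sanitize_gemini_output := by
  intro text required_first_line _
  unfold Spec_sanitize_gemini_output
  dsimp only [sanitize_gemini_output, sanitize_gemini_output_alt]
  have hmeta : ∀ x ∈ ((PySem.Str.split? text "\n").getD []).filter (fun l => !pvMeta l),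
      pvMeta x = false := by
    intro x hx
    simpa using (List.of_mem_filter hx)
  rw [pvFoldA_filter, pvFoldA_keepRun _ _ _ hmeta, pvZip_keepRun]
  simp only [List.nil_append]
  rw [pvDrop_eq_trimStart, pvTrimEnd_eq_rev, pvDrop_eq_trimStart]
  rfl
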